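-- pv_equiv track=rewrite | github.com/taozhewang/first_study | game/co/ui.py | get_best_solution_group
-- ===== SOURCE A (Python) =====
-- def get_best_solution_group(group1, group2, l_size, m_size):
--     joint1 = joint2 = 0
--
--     _l = l_size
--     for length in group1:
--         while _l < length:
--             _l += l_size
--             joint1 += 1
--         _l -= length
--         if l_size-_l<m_size: _l -= m_size-(l_size-_l)
--         if _l < m_size:
--             _l = l_size
--
--     _l = l_size
--     for length in group2:
--         while _l < length:
--             _l += l_size
--             joint2 += 1
--         _l -= length
--         if l_size-_l<m_size: _l -= m_size-(l_size-_l)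
--         if _l < m_size:
--             _l = l_size
--
--     return group1 if joint1 < joint2 else group2
-- ===== SOURCE B (Python) =====
-- def get_best_solution_group(group1, group2, l_size, m_size):
--     def joints(group):
--         j = 0
--         _l = l_size
--         for length in group:
--             if _l < length:
--                 k = -((_l - length) // l_size)  # ceil((length - _l) / l_size)
--                 j += k
--                 _l += k * l_size
--             _l -= length
--             if l_size - _l < m_size:
--                 _l = l_size - m_size
--             if _l < m_size:
--                 _l = l_size
--         return j
--     return group1 if joints(group1) < joints(group2) else group2
-- ===== Notes on version B (the rewrite author's own statement) =====
-- stated objective: alternative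
-- what changed: The inner while-loop that adds l_size one bar at a time is replaced by a single ceiling-division computing each piece's joint count directly, and the remainder correction is simplified to the closed form l_size - m_size.
-- outside the precondition, e.g. on get_best_solution_group([], [], -1, 0): A returns [], B returns []
import Mathlib
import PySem

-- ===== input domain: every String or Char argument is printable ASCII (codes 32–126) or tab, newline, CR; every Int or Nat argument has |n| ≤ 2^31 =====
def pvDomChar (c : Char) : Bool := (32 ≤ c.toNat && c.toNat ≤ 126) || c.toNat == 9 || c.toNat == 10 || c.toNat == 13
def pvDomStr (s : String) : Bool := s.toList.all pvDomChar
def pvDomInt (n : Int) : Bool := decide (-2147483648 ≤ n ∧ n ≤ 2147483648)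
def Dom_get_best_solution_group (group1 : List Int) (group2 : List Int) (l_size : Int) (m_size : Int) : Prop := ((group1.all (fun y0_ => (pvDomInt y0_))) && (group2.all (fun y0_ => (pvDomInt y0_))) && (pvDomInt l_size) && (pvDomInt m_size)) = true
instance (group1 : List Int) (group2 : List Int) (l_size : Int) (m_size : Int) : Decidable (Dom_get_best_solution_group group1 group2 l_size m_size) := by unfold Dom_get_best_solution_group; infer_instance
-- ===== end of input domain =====

-- B replaces A's one-bar-at-a-time inner while-loop by a single ceiling division per piece
-- (objective: alternative — the joint count per piece is computed in closed form).

-- ===== PORT A =====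
-- A's inner `while _l < length: _l += l_size; joint += 1`, run with fuel equal to the loop's
-- termination measure (len - _l).toNat — exact for l_size ≥ 1 (Pre_); for l_size ≤ 0 Python diverges.
def pvWhileA (L len : Int) : Nat → Int × Int → Int × Int
  | 0, s => s
  | n+1, (l, j) => if l < len then pvWhileA L len n (l + L, j + 1) else (l, j)

-- one iteration of A's `for length in group` body, state = (_l, joint)
def pvStepA (L m : Int) (s : Int × Int) (len : Int) : Int × Int :=
  let s1 := pvWhileA L len (len - s.1).toNat s
  let l1 := s1.1 - len
  let l2 := if L - l1 < m then l1 - (m - (L - l1)) else l1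
  let l3 := if l2 < m then L else l2
  (l3, s1.2)

def get_best_solution_group (group1 : List Int) (group2 : List Int) (l_size : Int) (m_size : Int) : List Int :=
  let joint1 := (group1.foldl (pvStepA l_size m_size) (l_size, 0)).2
  let joint2 := (group2.foldl (pvStepA l_size m_size) (l_size, 0)).2
  if joint1 < joint2 then group1 else group2

-- ===== PORT B =====
-- one iteration of B's loop body: the joint count k is obtained by ceiling division
def pvStepB (L m : Int) (s : Int × Int) (len : Int) : Int × Int :=
  let p := if s.1 < len then
      let k := -(PySem.Int.floordiv (s.1 - len) L)   -- ceil((len - _l) / l_size)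
      (s.1 + k * L, s.2 + k)
    else (s.1, s.2)
  let l1 := p.1 - len
  let l2 := if L - l1 < m then L - m else l1
  let l3 := if l2 < m then L else l2
  (l3, p.2)

def pvJointsB (L m : Int) (group : List Int) : Int :=
  (group.foldl (pvStepB L m) (L, 0)).2

def get_best_solution_group_alt (group1 : List Int) (group2 : List Int) (l_size : Int) (m_size : Int) : List Int :=
  if pvJointsB l_size m_size group1 < pvJointsB l_size m_size group2 then group1 else group2

-- ===== PRECONDITION & SPEC =====
-- Pre_ excludes non-positive l_size: there A's inner while-loop diverges as soon as some piece
-- exceeds the running remainder (on the degenerate l_size ≤ 0 inputs where the loop never runs,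
-- A does return, and B happens to agree there, but A's behaviour is dominated by divergence).
def Pre_get_best_solution_group (group1 : List Int) (group2 : List Int) (l_size : Int) (m_size : Int) : Prop := 1 ≤ l_size
instance (group1 : List Int) (group2 : List Int) (l_size : Int) (m_size : Int) : Decidable (Pre_get_best_solution_group group1 group2 l_size m_size) := by unfold Pre_get_best_solution_group; infer_instance

def pvWitness_get_best_solution_group : List Int × List Int × Int × Int := ([3, 7], [2, 2], 2, 1)

def Spec_get_best_solution_group (group1 : List Int) (group2 : List Int) (l_size : Int) (m_size : Int) (out : List Int) : Prop := out = get_best_solution_group_alt group1 group2 l_size m_size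
instance (group1 : List Int) (group2 : List Int) (l_size : Int) (m_size : Int) (out : List Int) : Decidable (Spec_get_best_solution_group group1 group2 l_size m_size out) := by unfold Spec_get_best_solution_group; infer_instance

-- ===== CLAIM (what is proved, stated in full; the proofs are below) =====
def Claim_equal_get_best_solution_group : Prop := ∀ (group1 : List Int) (group2 : List Int) (l_size : Int) (m_size : Int), Dom_get_best_solution_group group1 group2 l_size m_size → Pre_get_best_solution_group group1 group2 l_size m_size → Spec_get_best_solution_group group1 group2 l_size m_size (get_best_solution_group group1 group2 l_size m_size)

-- ===== LEMMAS AND PROOFS =====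

-- the while-loop, run with sufficient fuel, computes the ceiling-division closed form
theorem pvWhileA_eq (L len : Int) (hL : 1 ≤ L) :
    ∀ (n : Nat) (l j : Int), (len - l).toNat ≤ n →
      pvWhileA L len n (l, j) =
        if l < len then
          (l + (-(PySem.Int.floordiv (l - len) L)) * L, j + -(PySem.Int.floordiv (l - len) L))
        else (l, j) := by
  intro n
  induction n with
  | zero =>
      intro l j h
      have : ¬ l < len := by omega
      simp [pvWhileA, this]
  | succ n ih =>
      intro l j h
      by_cases hlt : l < len
      · set k : Int := -(PySem.Int.floordiv (l - len) L) with hkdef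
        have hb : (k - 1) * L < len - l ∧ len - l ≤ k * L := by
          have := (PySem.Int.neg_floordiv_neg_eq_iff_of_pos (a := len - l) (b := L)
            (by omega) (q := k)).mp (by rw [show -(len - l) = l - len by ring])
          exact this
        rw [pvWhileA]
        simp only [if_pos hlt]
        by_cases hlt2 : l + L < len
        · have hfuel : (len - (l + L)).toNat ≤ n := by omega
          rw [ih (l + L) (j + 1) hfuel]
          simp only [if_pos hlt2]
          have hk2 : -(PySem.Int.floordiv (l + L - len) L) = k - 1 := by
            have := (PySem.Int.neg_floordiv_neg_eq_iff_of_pos (a := len - (l + L)) (b := L)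
              (by omega) (q := k - 1)).mpr ⟨by linarith [hb.1], by linarith [hb.2]⟩
            rw [show -(len - (l + L)) = l + L - len by ring] at this
            exact this
          rw [hk2, Prod.mk.injEq]
          constructor <;> ring
        · -- exactly one iteration: k = 1
          have hk1 : k = 1 := by
            have h1 : 1 ≤ k := by nlinarith [hb.2]
            have h2 : k ≤ 1 := by nlinarith [hb.1]
            omega
          rw [ih (l + L) (j + 1) (by omega)]
          simp only [if_neg hlt2, Prod.mk.injEq]
          constructor
          · rw [hk1]; ring
          · rw [hk1]
      · rw [pvWhileA]
        simp [hlt]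

-- the two loop bodies agree for positive l_size
theorem step_eq (L m : Int) (hL : 1 ≤ L) (s : Int × Int) (len : Int) :
    pvStepA L m s len = pvStepB L m s len := by
  obtain ⟨l, j⟩ := s
  unfold pvStepA pvStepB
  rw [pvWhileA_eq L len hL _ l j le_rfl]
  by_cases hlt : l < len
  · simp only [if_pos hlt]
    set k : Int := -(PySem.Int.floordiv (l - len) L)
    -- A's correction `_l - (m - (L - _l))` is the closed form `L - m`
    have hcorr : ∀ x : Int, x - (m - (L - x)) = L - m := by intro x; ring
    simp only [hcorr]
  · simp only [if_neg hlt]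
    have hcorr : ∀ x : Int, x - (m - (L - x)) = L - m := by intro x; ring
    simp only [hcorr]

-- ===== VERDICT (by name: the statement is the Claim_ definition above) =====
theorem get_best_solution_group_spec : Claim_equal_get_best_solution_group := by
  intro group1 group2 L m _hdom hpre
  unfold Spec_get_best_solution_group
  unfold get_best_solution_group get_best_solution_group_alt pvJointsB
  have hstep : pvStepA L m = pvStepB L m :=
    funext fun s => funext fun len => step_eq L m hpre s len
  rw [hstep]
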